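-- pv_equiv track=rewrite | github.com/gstredny/lauren-loop | scripts/nightshift/python/nightshift/validation.py | _final_result_block
-- ===== SOURCE A (Python) =====
-- VALIDATION_RESULT_HEADER = "### Validation Result:"
--
-- def _final_result_block(agent_output: str) -> list[str] | None:
--     block: list[str] | None = None
--     capture = False
--     for line in agent_output.splitlines():
--         if line.startswith(VALIDATION_RESULT_HEADER):
--             block = [line]
--             capture = True
--             continue
--         if capture and block is not None:
--             block.append(line)
--     return block
-- ===== SOURCE B (Python) =====
-- VALIDATION_RESULT_HEADER = "### Validation Result:"
--
--
-- def _final_result_block(agent_output: str) -> list[str] | None: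
--     lines = agent_output.splitlines()
--     last = None
--     for i, line in enumerate(lines):
--         if line.startswith(VALIDATION_RESULT_HEADER):
--             last = i
--     if last is None:
--         return None
--     return lines[last:]
-- ===== Notes on version B (the rewrite author's own statement) =====
-- stated objective: simpler
-- what changed: Replaces the capture-flag accumulator that rebuilds the block line by line with a find-the-last-header-index pass followed by a single slice lines[last:].
import Mathlib
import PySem

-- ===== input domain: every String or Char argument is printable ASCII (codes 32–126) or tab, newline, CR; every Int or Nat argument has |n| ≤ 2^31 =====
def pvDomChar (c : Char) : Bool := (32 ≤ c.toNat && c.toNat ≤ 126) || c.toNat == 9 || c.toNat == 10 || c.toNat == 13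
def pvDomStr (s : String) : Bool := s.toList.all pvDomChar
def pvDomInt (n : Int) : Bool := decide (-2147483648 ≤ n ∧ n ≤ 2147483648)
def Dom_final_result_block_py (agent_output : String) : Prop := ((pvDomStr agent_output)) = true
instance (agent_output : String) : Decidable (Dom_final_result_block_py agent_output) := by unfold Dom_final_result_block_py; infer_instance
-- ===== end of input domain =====

-- B replaces A's capture-flag accumulator with a last-header-index scan plus one slice; same cost, simpler shape.

-- ===== PORT A =====
-- literal transliteration of A: fold over splitlines with state (block, capture)
def final_result_block_py (agent_output : String) : Option (List String) :=
  ((PySem.Str.splitlines agent_output).foldl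
    (fun (st : Option (List String) × Bool) line =>
      if PySem.Str.startswith line "### Validation Result:" then
        (some [line], true)
      else if st.2 && st.1.isSome then
        (st.1.map (fun b => b ++ [line]), st.2)
      else st)
    (none, false)).1

-- ===== PORT B =====
-- literal transliteration of B: enumerate to find the last header index, then slice lines[last:]
def final_result_block_py_alt (agent_output : String) : Option (List String) :=
  let lines := PySem.Str.splitlines agent_output
  let last := (PySem.List.enumerate lines 0).foldl
    (fun (acc : Option Int) (p : Int × String) =>
      if PySem.Str.startswith p.2 "### Validation Result:" then some p.1 else acc) none
  match last with
  | none => none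
  | some i => some (PySem.List.slice lines (some i) none)

-- ===== PRECONDITION & SPEC =====
def Spec_final_result_block_py (agent_output : String) (out : Option (List String)) : Prop := out = final_result_block_py_alt agent_output
instance (agent_output : String) (out : Option (List String)) : Decidable (Spec_final_result_block_py agent_output out) := by unfold Spec_final_result_block_py; infer_instance

-- ===== CLAIM (what is proved, stated in full; the proofs are below) =====
def Claim_equal_final_result_block_py : Prop := ∀ (agent_output : String), Dom_final_result_block_py agent_output → Spec_final_result_block_py agent_output (final_result_block_py agent_output)

-- ===== LEMMAS AND PROOFS =====

-- abbreviation for the header test (proof-side only)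
def pvHdr (line : String) : Bool := PySem.Str.startswith line "### Validation Result:"

-- common specification: the suffix starting at the last header line, if any
def pvSpecFR : List String → Option (List String)
  | [] => none
  | x :: xs =>
    match pvSpecFR xs with
    | some r => some r
    | none => if pvHdr x then some (x :: xs) else none

-- index of the last header line
def pvLastIdx : List String → Option Nat
  | [] => none
  | x :: xs =>
    match pvLastIdx xs with
    | some i => some (i + 1)
    | none => if pvHdr x then some 0 else none

def pvStepA (st : Option (List String) × Bool) (line : String) : Option (List String) × Bool :=
  if pvHdr line then (some [line], true)
  else if st.2 && st.1.isSome then (st.1.map (fun b => b ++ [line]), st.2)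
  else st

lemma foldA_captured (l : List String) (b : List String) :
    (l.foldl pvStepA (some b, true)).1 = some ((pvSpecFR l).getD (b ++ l)) := by
  induction l generalizing b with
  | nil => simp [pvSpecFR]
  | cons x xs ih =>
    rw [List.foldl_cons]
    by_cases h : pvHdr x = true
    · rw [show pvStepA (some b, true) x = (some [x], true) from by simp [pvStepA, h], ih]
      cases hs : pvSpecFR xs <;> simp [pvSpecFR, hs, h]
    · rw [show pvStepA (some b, true) x = (some (b ++ [x]), true) from by simp [pvStepA, h], ih]
      cases hs : pvSpecFR xs <;> simp [pvSpecFR, hs, h]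

lemma foldA_spec (l : List String) :
    (l.foldl pvStepA (none, false)).1 = pvSpecFR l := by
  induction l with
  | nil => simp [pvSpecFR]
  | cons x xs ih =>
    rw [List.foldl_cons]
    by_cases h : pvHdr x = true
    · rw [show pvStepA (none, false) x = (some [x], true) from by simp [pvStepA, h],
        foldA_captured]
      cases hs : pvSpecFR xs <;> simp [pvSpecFR, hs, h]
    · rw [show pvStepA (none, false) x = (none, false) from by simp [pvStepA, h], ih]
      cases hs : pvSpecFR xs <;> simp [pvSpecFR, hs, h]

lemma foldB_lastIdx (l : List String) (k : Int) (acc : Option Int) :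
    (PySem.List.enumerate l k).foldl
      (fun (acc : Option Int) (p : Int × String) =>
        if PySem.Str.startswith p.2 "### Validation Result:" then some p.1 else acc) acc =
      match pvLastIdx l with
      | some i => some (k + i)
      | none => acc := by
  induction l generalizing k acc with
  | nil => simp [PySem.List.enumerate_nil, pvLastIdx]
  | cons x xs ih =>
    rw [PySem.List.enumerate_cons, List.foldl_cons, ih]
    cases hs : pvLastIdx xs with
    | some i =>
      simp only [pvLastIdx, hs]
      congr 1
      push_cast
      ring
    | none =>
      by_cases h : pvHdr x = true
      · simp [pvLastIdx, hs, pvHdr] at h ⊢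
        simp [h]
      · simp [pvLastIdx, hs, pvHdr] at h ⊢
        simp [h]

lemma lastIdx_spec (l : List String) :
    pvSpecFR l = (pvLastIdx l).map (fun i => l.drop i) := by
  induction l with
  | nil => simp [pvSpecFR, pvLastIdx]
  | cons x xs ih =>
    cases hs : pvLastIdx xs with
    | some i =>
      have h2 : pvSpecFR xs = some (xs.drop i) := by simp [ih, hs]
      simp [pvSpecFR, pvLastIdx, hs, h2]
    | none =>
      have h2 : pvSpecFR xs = none := by simp [ih, hs]
      by_cases h : pvHdr x = true
      · simp [pvSpecFR, pvLastIdx, hs, h2, h]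
      · simp [pvSpecFR, pvLastIdx, hs, h2, h]

lemma alt_spec (s : String) :
    final_result_block_py_alt s = pvSpecFR (PySem.Str.splitlines s) := by
  show (match (PySem.List.enumerate (PySem.Str.splitlines s) 0).foldl
      (fun (acc : Option Int) (p : Int × String) =>
        if PySem.Str.startswith p.2 "### Validation Result:" then some p.1 else acc) none with
    | none => none
    | some i => some (PySem.List.slice (PySem.Str.splitlines s) (some i) none)) =
    pvSpecFR (PySem.Str.splitlines s)
  rw [foldB_lastIdx, lastIdx_spec]
  cases hs : pvLastIdx (PySem.Str.splitlines s) with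
  | none => simp
  | some i =>
    simp only [Option.map_some, zero_add]
    rw [PySem.List.slice_from _ (by positivity)]
    simp

-- ===== VERDICT (by name: the statement is the Claim_ definition above) =====
theorem final_result_block_py_spec : Claim_equal_final_result_block_py := by
  intro s _
  unfold Spec_final_result_block_py final_result_block_py
  rw [alt_spec]
  exact foldA_spec (PySem.Str.splitlines s)
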